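-- pv_equiv track=rewrite | github.com/Scientific-Computing-Lab/MPI-rigen | MonoCoder/tokenizer/tokompiler/convert_representation.py | replace_vars
-- ===== SOURCE A (Python) =====
-- def count_newlines(code):
--     counter = 0
--
--     for letter in code:
--         if letter == '\n':
--             counter += 1
--             continue
--
--         return counter
--
--     return counter
--
-- def replace_vars(code, var_mapping):
--     '''
--         Create replaced representation
--     '''
--     updated_code = ''
--     prev_idx = 0
--     offset = count_newlines(code)
--     updated_mappings = []
--     var_offset = 0
--
--     for old_var, new_var, start, end in var_mapping:
--         updated_mappings.append((new_var, old_var, start-offset+var_offset, start-offset+var_offset+len(new_var)))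
--         var_offset += len(new_var)-len(old_var)
--         updated_code += code[prev_idx:start-offset] + new_var
--         prev_idx = end - offset
--
--     updated_code += code[prev_idx:]
--
--     return updated_code, updated_mappings
-- ===== SOURCE B (Python) =====
-- def replace_vars(code, var_mapping):
--     '''
--         Create replaced representation
--     '''
--     # leading newlines = what lstrip('\n') removes
--     offset = len(code) - len(code.lstrip('\n'))
--
--     # prefix-sum table of length deltas, zipped with the entries
--     cum = [0]
--     for old_var, new_var, _, _ in var_mapping:
--         cum.append(cum[-1] + len(new_var) - len(old_var))
--     updated_mappings = [
--         (nv, ov, s - offset + c, s - offset + c + len(nv))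
--         for (ov, nv, s, _), c in zip(var_mapping, cum)
--     ]
--
--     # assemble the output back to front, prepending pieces
--     prevs = [0] + [e - offset for _, _, _, e in var_mapping]
--     result = code[prevs[-1]:]
--     for (ov, nv, s, _), prev in zip(reversed(var_mapping), reversed(prevs[:-1])):
--         result = code[prev:s - offset] + nv + result
--     return result, updated_mappings
-- ===== Notes on version B (the rewrite author's own statement) =====
-- stated objective: alternative
-- what changed: A's single forward loop with a running string accumulator, prev index, mapping list and var_offset is replaced by: offset computed as len(code)-len(code.lstrip('\n')); mappings built by zipping the entries with a separately built prefix-sum table of length deltas; and the output assembled back to front by iterating the mapping reversed and prepending each piece, starting from the final tail slice.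
import Mathlib
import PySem

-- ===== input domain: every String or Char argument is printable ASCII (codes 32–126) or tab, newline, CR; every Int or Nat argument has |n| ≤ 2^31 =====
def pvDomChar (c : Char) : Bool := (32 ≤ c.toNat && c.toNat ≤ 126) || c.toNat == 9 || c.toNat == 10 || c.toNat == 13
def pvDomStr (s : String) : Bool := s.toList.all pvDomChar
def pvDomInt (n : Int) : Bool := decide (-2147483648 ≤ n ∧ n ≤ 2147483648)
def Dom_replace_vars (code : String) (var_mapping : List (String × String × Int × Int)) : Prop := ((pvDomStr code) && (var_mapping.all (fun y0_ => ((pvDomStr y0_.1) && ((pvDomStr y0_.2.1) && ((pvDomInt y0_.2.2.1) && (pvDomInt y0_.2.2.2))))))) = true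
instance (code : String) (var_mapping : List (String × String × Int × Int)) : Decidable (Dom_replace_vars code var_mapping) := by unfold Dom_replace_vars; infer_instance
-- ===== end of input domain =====

-- B replaces A's single forward accumulator loop by an lstrip-based offset, a zip with a
-- prefix-sum table for the mappings, and a back-to-front assembly of the output (alternative decomposition).

-- ===== PORT A =====
-- count_newlines: counter loop with an early return at the first non-'\n' character
def pvCountNewlinesGo : List Char → Int → Int
  | [], counter => counter
  | letter :: rest, counter =>
      if letter = '\n' then pvCountNewlinesGo rest (counter + 1) else counter

def count_newlines (code : String) : Int := pvCountNewlinesGo code.toList 0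

def replace_vars (code : String) (var_mapping : List (String × String × Int × Int)) :
    String × (List (String × String × Int × Int)) :=
  let offset := count_newlines code
  let st := var_mapping.foldl
    (fun (st : String × Int × List (String × String × Int × Int) × Int) v =>
      (st.1 ++ PySem.Str.slice code (some st.2.1) (some (v.2.2.1 - offset)) ++ v.2.1,
       v.2.2.2 - offset,
       st.2.2.1 ++ [(v.2.1, v.1, v.2.2.1 - offset + st.2.2.2,
                     v.2.2.1 - offset + st.2.2.2 + PySem.Str.len v.2.1)],
       st.2.2.2 + (PySem.Str.len v.2.1 - PySem.Str.len v.1)))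
    ("", 0, [], 0)
  (st.1 ++ PySem.Str.slice code (some st.2.1) none, st.2.2.1)

-- ===== PORT B =====
-- hand port of code.lstrip('\n'): drop exactly the leading '\n' characters (exact)
def pvLstripNl (l : List Char) : List Char := l.dropWhile (fun c => c == '\n')

def replace_vars_alt (code : String) (var_mapping : List (String × String × Int × Int)) :
    String × (List (String × String × Int × Int)) :=
  let offset : Int := (code.toList.length : Int) - ((pvLstripNl code.toList).length : Int)
  -- prefix-sum table of length deltas ('cum'), zipped with the entries
  let cum := var_mapping.foldl
    (fun (cum : List Int) v =>
      cum ++ [cum.getLast! + PySem.Str.len v.2.1 - PySem.Str.len v.1])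
    [0]
  let updated_mappings := (var_mapping.zip cum).map
    (fun vc => (vc.1.2.1, vc.1.1, vc.1.2.2.1 - offset + vc.2,
                vc.1.2.2.1 - offset + vc.2 + PySem.Str.len vc.1.2.1))
  -- back-to-front assembly, prepending pieces
  let prevs : List Int := 0 :: var_mapping.map (fun v => v.2.2.2 - offset)
  let result := (var_mapping.reverse.zip prevs.dropLast.reverse).foldl
    (fun r vp =>
      PySem.Str.slice code (some vp.2) (some (vp.1.2.2.1 - offset)) ++ vp.1.2.1 ++ r)
    (PySem.Str.slice code (some prevs.getLast!) none)
  (result, updated_mappings)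

-- ===== PRECONDITION & SPEC =====
def Spec_replace_vars (code : String) (var_mapping : List (String × String × Int × Int)) (out : String × (List (String × String × Int × Int))) : Prop := out = replace_vars_alt code var_mapping
instance (code : String) (var_mapping : List (String × String × Int × Int)) (out : String × (List (String × String × Int × Int))) : Decidable (Spec_replace_vars code var_mapping out) := by unfold Spec_replace_vars; infer_instance

-- ===== CLAIM =====
def Claim_equal_replace_vars : Prop := ∀ (code : String) (var_mapping : List (String × String × Int × Int)), Dom_replace_vars code var_mapping → Spec_replace_vars code var_mapping (replace_vars code var_mapping)

-- ===== LEMMAS AND PROOFS =====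

-- common specification of the result string: rebuild from position p
def pvRebuild (code : String) (offset : Int) : Int → List (String × String × Int × Int) → String
  | p, [] => PySem.Str.slice code (some p) none
  | p, v :: rest =>
      PySem.Str.slice code (some p) (some (v.2.2.1 - offset)) ++ v.2.1 ++
        pvRebuild code offset (v.2.2.2 - offset) rest

-- common specification of the updated mappings, from running offset vo
def pvMaps (offset : Int) : Int → List (String × String × Int × Int) → List (String × String × Int × Int)
  | _, [] => []
  | vo, v :: rest =>
      (v.2.1, v.1, v.2.2.1 - offset + vo, v.2.2.1 - offset + vo + PySem.Str.len v.2.1) ::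
        pvMaps offset (vo + (PySem.Str.len v.2.1 - PySem.Str.len v.1)) rest

-- tail of the prefix-sum list from running value c
def pvScan : Int → List (String × String × Int × Int) → List Int
  | _, [] => []
  | c, v :: rest =>
      (c + PySem.Str.len v.2.1 - PySem.Str.len v.1) ::
        pvScan (c + PySem.Str.len v.2.1 - PySem.Str.len v.1) rest

-- the two offsets agree: A's counter loop counts the characters lstrip('\n') removes
theorem pvCount_takeWhile (l : List Char) (c : Int) :
    pvCountNewlinesGo l c = c + ((l.takeWhile (fun ch => ch == '\n')).length : Int) := by
  induction l generalizing c with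
  | nil => simp [pvCountNewlinesGo]
  | cons ch rest ih =>
    by_cases h : ch = '\n'
    · simp [pvCountNewlinesGo, h, ih]; ring
    · simp [pvCountNewlinesGo, h]

theorem offset_eq (code : String) :
    (code.toList.length : Int) - ((pvLstripNl code.toList).length : Int) = count_newlines code := by
  unfold count_newlines pvLstripNl
  rw [pvCount_takeWhile]
  have h : (code.toList.takeWhile (fun ch => ch == '\n')).length
      + (code.toList.dropWhile (fun ch => ch == '\n')).length = code.toList.length := by
    rw [← List.length_append, List.takeWhile_append_dropWhile]
  omega

-- A's fold realizes pvRebuild and pvMaps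
theorem pvA_fold (code : String) (offset : Int) (vm : List (String × String × Int × Int)) :
    ∀ (u : String) (p : Int) (ms : List (String × String × Int × Int)) (vo : Int),
    (let st := vm.foldl
        (fun (st : String × Int × List (String × String × Int × Int) × Int) v =>
          (st.1 ++ PySem.Str.slice code (some st.2.1) (some (v.2.2.1 - offset)) ++ v.2.1,
           v.2.2.2 - offset,
           st.2.2.1 ++ [(v.2.1, v.1, v.2.2.1 - offset + st.2.2.2,
                         v.2.2.1 - offset + st.2.2.2 + PySem.Str.len v.2.1)],
           st.2.2.2 + (PySem.Str.len v.2.1 - PySem.Str.len v.1)))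
        (u, p, ms, vo)
     st.1 ++ PySem.Str.slice code (some st.2.1) none = u ++ pvRebuild code offset p vm ∧
       st.2.2.1 = ms ++ pvMaps offset vo vm) := by
  induction vm with
  | nil => intro u p ms vo; simp [pvRebuild, pvMaps]
  | cons v rest ih =>
    intro u p ms vo
    simp only [List.foldl_cons]
    have h := ih (u ++ PySem.Str.slice code (some p) (some (v.2.2.1 - offset)) ++ v.2.1)
      (v.2.2.2 - offset)
      (ms ++ [(v.2.1, v.1, v.2.2.1 - offset + vo, v.2.2.1 - offset + vo + PySem.Str.len v.2.1)])
      (vo + (PySem.Str.len v.2.1 - PySem.Str.len v.1))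
    simp only at h ⊢
    refine ⟨?_, ?_⟩
    · rw [h.1]; simp [pvRebuild, String.append_assoc]
    · rw [h.2]; simp [pvMaps]

-- B's prefix-sum fold builds cum0 ++ pvScan (last cum0)
theorem pvB_cum (vm : List (String × String × Int × Int)) :
    ∀ (cum0 : List Int), cum0 ≠ [] →
    vm.foldl
      (fun (cum : List Int) v =>
        cum ++ [cum.getLast! + PySem.Str.len v.2.1 - PySem.Str.len v.1])
      cum0 = cum0 ++ pvScan cum0.getLast! vm := by
  induction vm with
  | nil => intro cum0 _; simp [pvScan]
  | cons v rest ih =>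
    intro cum0 h0
    simp only [List.foldl_cons]
    rw [ih (cum0 ++ [cum0.getLast! + PySem.Str.len v.2.1 - PySem.Str.len v.1]) (by simp)]
    simp [pvScan]

-- zipping the entries with the prefix sums yields pvMaps
theorem pvB_maps (offset : Int) (vm : List (String × String × Int × Int)) :
    ∀ (c : Int),
    (vm.zip (c :: pvScan c vm)).map
      (fun vc => (vc.1.2.1, vc.1.1, vc.1.2.2.1 - offset + vc.2,
                  vc.1.2.2.1 - offset + vc.2 + PySem.Str.len vc.1.2.1)) =
      pvMaps offset c vm := by
  induction vm with
  | nil => intro c; simp [pvMaps]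
  | cons v rest ih =>
    intro c
    simp only [pvScan, List.zip_cons_cons, List.map_cons, pvMaps, List.cons.injEq]
    refine ⟨trivial, ?_⟩
    have := ih (c + PySem.Str.len v.2.1 - PySem.Str.len v.1)
    have e : c + PySem.Str.len v.2.1 - PySem.Str.len v.1
        = c + (PySem.Str.len v.2.1 - PySem.Str.len v.1) := by ring
    rw [← e]
    exact this

-- zip of two reversed lists of equal length
theorem pvZip_reverse {α β : Type} (xs : List α) :
    ∀ (ys : List β), xs.length = ys.length →
    xs.reverse.zip ys.reverse = (xs.zip ys).reverse := by
  induction xs with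
  | nil => intro ys h; simp
  | cons x xs ih =>
    intro ys h
    cases ys with
    | nil => simp at h
    | cons y ys =>
      have hl : xs.length = ys.length := by simpa using h
      simp only [List.reverse_cons]
      rw [List.zip_append (by simp [hl])]
      rw [ih ys hl]
      simp

-- B's back-to-front fold realizes pvRebuild
theorem pvB_build (code : String) (offset : Int) (vm : List (String × String × Int × Int)) :
    ∀ (p : Int),
    ((vm.zip ((p :: vm.map (fun v => v.2.2.2 - offset)).dropLast)).foldr
      (fun vp r =>
        PySem.Str.slice code (some vp.2) (some (vp.1.2.2.1 - offset)) ++ vp.1.2.1 ++ r)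
      (PySem.Str.slice code
        (some ((p :: vm.map (fun v => v.2.2.2 - offset)).getLast!)) none)) =
      pvRebuild code offset p vm := by
  induction vm with
  | nil => intro p; simp [pvRebuild]
  | cons v rest ih =>
    intro p
    simp only [List.map_cons, List.dropLast_cons₂, List.zip_cons_cons, List.foldr_cons]
    have hlast : (p :: (v.2.2.2 - offset) :: rest.map (fun v => v.2.2.2 - offset)).getLast!
        = ((v.2.2.2 - offset) :: rest.map (fun v => v.2.2.2 - offset)).getLast! := by
      simp [List.getLast!]
    rw [hlast]
    rw [ih (v.2.2.2 - offset)]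
    simp [pvRebuild]

theorem replace_vars_eq (code : String) (vm : List (String × String × Int × Int)) :
    replace_vars code vm = replace_vars_alt code vm := by
  unfold replace_vars replace_vars_alt
  rw [offset_eq]
  have hA := pvA_fold code (count_newlines code) vm "" 0 [] 0
  simp only at hA
  have hcum := pvB_cum vm [0] (by simp)
  have hmaps := pvB_maps (count_newlines code) vm 0
  have hlen : vm.length = ((0 : Int) :: vm.map (fun v => v.2.2.2 - count_newlines code)).dropLast.length := by
    simp
  have hzip := pvZip_reverse vm ((0 : Int) :: vm.map (fun v => v.2.2.2 - count_newlines code)).dropLast hlen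
  have hbuild := pvB_build code (count_newlines code) vm 0
  have h0 : ([0] : List Int).getLast! = 0 := by decide
  refine Prod.ext ?_ ?_
  · simp only
    rw [hzip, List.foldl_reverse]
    rw [hbuild]
    simpa using hA.1
  · simp only [hcum, h0]
    rw [show ([0] : List Int) ++ pvScan 0 vm = (0 : Int) :: pvScan 0 vm by simp]
    rw [hmaps]
    simpa using hA.2

-- ===== VERDICT =====
theorem replace_vars_spec : Claim_equal_replace_vars := by
  intro code vm _
  unfold Spec_replace_vars
  exact replace_vars_eq code vm
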